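-- pv_equiv track=rewrite | github.com/olivercalder/sonic-signatures | texts.py | nest_dict_by_play
-- ===== SOURCE A (Python) =====
-- def nest_dict_by_play(text_dict):
--     text_dict_nested = {}
--     for char in text_dict:
--         play = char.split('_')[0]
--         if play not in text_dict_nested:
--             text_dict_nested[play] = {}
--         text_dict_nested[play][char] = text_dict[char]
--     return text_dict_nested
-- ===== SOURCE B (Python) =====
-- def nest_dict_by_play(text_dict):
--     play = lambda c: c.split('_')[0]
--     plays = dict.fromkeys(play(c) for c in text_dict)
--     return {p: {c: text_dict[c] for c in text_dict if play(c) == p}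
--             for p in plays}
-- ===== Notes on version B (the rewrite author's own statement) =====
-- stated objective: alternative
-- what changed: Replaces the incremental membership-test-and-insert loop with a two-pass grouped comprehension: collect the distinct play prefixes with dict.fromkeys, then build each play's inner dict by a filtering comprehension over the whole dict.
import Mathlib
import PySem

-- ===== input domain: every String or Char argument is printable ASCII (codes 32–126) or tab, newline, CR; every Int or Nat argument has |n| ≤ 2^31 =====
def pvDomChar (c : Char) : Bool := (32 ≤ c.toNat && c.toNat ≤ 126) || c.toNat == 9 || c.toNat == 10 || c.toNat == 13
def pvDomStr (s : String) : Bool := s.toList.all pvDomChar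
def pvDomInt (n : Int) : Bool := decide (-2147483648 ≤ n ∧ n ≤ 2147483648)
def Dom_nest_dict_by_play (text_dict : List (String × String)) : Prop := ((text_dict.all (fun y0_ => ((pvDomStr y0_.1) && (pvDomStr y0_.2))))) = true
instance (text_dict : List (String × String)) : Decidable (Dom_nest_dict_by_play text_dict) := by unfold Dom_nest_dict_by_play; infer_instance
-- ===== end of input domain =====

-- B groups by a sort-free two-pass comprehension (distinct play prefixes, then one filtering
-- comprehension per play) instead of A's incremental membership-test-and-insert loop; same output.

-- shared helper: char.split('_')[0]  (split? with a nonempty separator never returns none or [])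
def pvPlay (c : String) : String := ((PySem.Str.split? c "_").getD []).headD ""

-- ===== PORT A =====
-- loop body of A's 'for char in text_dict' (one step, transliterated branch for branch)
def pvStepA (td : PySem.Dict String String)
    (acc : PySem.Dict String (PySem.Dict String String)) (char : String) :
    PySem.Dict String (PySem.Dict String String) :=
  let play := pvPlay char
  let acc' := if acc.contains play then acc else acc.insert play PySem.Dict.empty
  acc'.insert play ((acc'.getD play PySem.Dict.empty).insert char (td.getD char ""))

def nest_dict_by_play (text_dict : List (String × String)) : List (String × List (String × String)) :=
  let td : PySem.Dict String String := PySem.Dict.mk text_dict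
  let nested := td.keys.foldl (pvStepA td) PySem.Dict.empty
  nested.items.map (fun p => (p.1, p.2.items))

-- ===== PORT B =====
-- inner comprehension {c: text_dict[c] for c in text_dict if play(c) == p}
def pvInnerB (td : PySem.Dict String String) (p : String) : PySem.Dict String String :=
  td.keys.foldl
    (fun inner c => if pvPlay c == p then inner.insert c (td.getD c "") else inner)
    PySem.Dict.empty

def nest_dict_by_play_alt (text_dict : List (String × String)) : List (String × List (String × String)) :=
  let td : PySem.Dict String String := PySem.Dict.mk text_dict
  let plays := PySem.List.dedup (td.keys.map pvPlay)   -- dict.fromkeys(play(c) for c in text_dict)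
  let outer := plays.foldl (fun d p => d.insert p (pvInnerB td p))
      (PySem.Dict.empty : PySem.Dict String (PySem.Dict String String))
  outer.items.map (fun p => (p.1, p.2.items))

-- ===== PRECONDITION & SPEC =====
def Spec_nest_dict_by_play (text_dict : List (String × String)) (out : List (String × List (String × String))) : Prop := out = nest_dict_by_play_alt text_dict
instance (text_dict : List (String × String)) (out : List (String × List (String × String))) : Decidable (Spec_nest_dict_by_play text_dict out) := by unfold Spec_nest_dict_by_play; infer_instance

-- ===== CLAIM (what is proved, stated in full; the proofs are below) =====
def Claim_equal_nest_dict_by_play : Prop := ∀ (text_dict : List (String × String)), Dom_nest_dict_by_play text_dict → Spec_nest_dict_by_play text_dict (nest_dict_by_play text_dict)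

-- ===== LEMMAS AND PROOFS =====

-- pvInnerB generalized to an arbitrary key list (proof helper)
def pvGroup (td : PySem.Dict String String) (ks : List String) (q : String) : PySem.Dict String String :=
  ks.foldl
    (fun inner c => if pvPlay c == q then inner.insert c (td.getD c "") else inner)
    PySem.Dict.empty

theorem pvGroup_append (td : PySem.Dict String String) (ks : List String) (c q : String) :
    pvGroup td (ks ++ [c]) q =
      if pvPlay c == q then (pvGroup td ks q).insert c (td.getD c "") else pvGroup td ks q := by
  simp [pvGroup, List.foldl_append]

theorem pvGroup_empty (td : PySem.Dict String String) (ks : List String) (q : String)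
    (h : ∀ x ∈ ks, ¬ pvPlay x = q) : pvGroup td ks q = PySem.Dict.empty := by
  induction ks using List.reverseRecOn with
  | nil => rfl
  | append_singleton ks c ih =>
      rw [pvGroup_append]
      have hc : ¬ pvPlay c = q := h c (by simp)
      simp only [beq_iff_eq, hc, if_false]
      exact ih (fun x hx => h x (by simp [hx]))

theorem foldA_items (td : PySem.Dict String String) (ks : List String) :
    (ks.foldl (pvStepA td) PySem.Dict.empty).items
      = (PySem.List.dedup (ks.map pvPlay)).map (fun q => (q, pvGroup td ks q)) := by
  induction ks using List.reverseRecOn with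
  | nil => rfl
  | append_singleton ks c ih =>
      set L := PySem.List.dedup (ks.map pvPlay) with hL
      set D := ks.foldl (pvStepA td) PySem.Dict.empty with hD
      have hkeys : D.keys = L := by
        show D.items.map Prod.fst = L
        rw [ih]; simp [Function.comp_def]
      have hnodup : D.keys.Nodup := by
        rw [hkeys]; exact PySem.List.nodup_dedup _
      have hdd : PySem.List.dedup ((ks ++ [c]).map pvPlay) = PySem.Set.add L (pvPlay c) := by
        rw [List.map_append, PySem.List.dedup_eq_ofList, PySem.Set.ofList_append,
          List.map_singleton, PySem.Set.update_cons, PySem.Set.update_nil,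
          hL, PySem.List.dedup_eq_ofList]
      have hfold : (ks ++ [c]).foldl (pvStepA td) PySem.Dict.empty = pvStepA td D c := by
        rw [List.foldl_append, ← hD]; rfl
      rw [hfold, hdd]
      by_cases hp : pvPlay c ∈ L
      · -- play already present: A overwrites its entry in place; dedup is unchanged
        have hcont : D.contains (pvPlay c) = true :=
          (PySem.Dict.contains_iff_mem_keys D (pvPlay c)).2 (hkeys ▸ hp)
        have hmem : (pvPlay c, pvGroup td ks (pvPlay c)) ∈ D.items := by
          rw [ih]; exact List.mem_map_of_mem hp
        have hgetD : D.getD (pvPlay c) PySem.Dict.empty = pvGroup td ks (pvPlay c) :=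
          PySem.Dict.getD_of_mem_items D hmem hnodup _
        have hadd : PySem.Set.add L (pvPlay c) = L := by
          unfold PySem.Set.add
          simp [PySem.Set.contains, hp]
        rw [hadd]
        show (pvStepA td D c).items = _
        unfold pvStepA
        simp only [hcont, if_true, hgetD]
        rw [PySem.Dict.items_insert_of_contains _ _ hcont, ih, List.map_map]
        apply List.map_congr_left
        intro q _
        by_cases hq : q = pvPlay c
        · subst hq; simp [pvGroup_append]
        · have : ¬ pvPlay c = q := fun h => hq h.symm
          simp [hq, pvGroup_append, this]
      · -- new play: A appends a fresh singleton group; dedup gains the play at the end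
        have hcont : D.contains (pvPlay c) = false := by
          cases hcc : D.contains (pvPlay c) with
          | false => rfl
          | true => exact absurd ((PySem.Dict.contains_iff_mem_keys D (pvPlay c)).1 hcc) (hkeys ▸ hp)
        have hadd : PySem.Set.add L (pvPlay c) = L ++ [pvPlay c] := by
          unfold PySem.Set.add
          simp [PySem.Set.contains, hp]
        have hnone : ∀ x ∈ ks, ¬ pvPlay x = pvPlay c := by
          intro x hx he
          exact hp (by rw [hL, PySem.List.mem_dedup]; exact he ▸ List.mem_map_of_mem hx)
        have hg0 : pvGroup td ks (pvPlay c) = PySem.Dict.empty := pvGroup_empty td ks _ hnone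
        show (pvStepA td D c).items = _
        unfold pvStepA
        simp only [hcont, Bool.false_eq_true, if_false]
        rw [PySem.Dict.insert_insert_self, PySem.Dict.items_insert_of_not_contains _ _ hcont,
          hadd, List.map_append, ih]
        congr 1
        · apply List.map_congr_left
          intro q hq
          have : ¬ pvPlay c = q := by rintro rfl; exact hp hq
          simp [pvGroup_append, this]
        · simp [pvGroup_append, hg0]

theorem foldB_items (td : PySem.Dict String String) :
    ((PySem.List.dedup (td.keys.map pvPlay)).foldl (fun d p => d.insert p (pvInnerB td p))
        (PySem.Dict.empty : PySem.Dict String (PySem.Dict String String))).items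
      = (PySem.List.dedup (td.keys.map pvPlay)).map (fun q => (q, pvInnerB td q)) := by
  have h := PySem.Dict.items_foldl_insert_fresh (PySem.List.dedup (td.keys.map pvPlay))
    (fun p => p) (fun p => pvInnerB td p)
    (PySem.Dict.empty : PySem.Dict String (PySem.Dict String String))
    (fun a _ => by simp) (by simp [PySem.List.nodup_dedup])
  simpa using h

-- ===== VERDICT (by name: the statement is the Claim_ definition above) =====
theorem nest_dict_by_play_spec : Claim_equal_nest_dict_by_play := by
  intro text_dict _
  show nest_dict_by_play text_dict = nest_dict_by_play_alt text_dict
  unfold nest_dict_by_play nest_dict_by_play_alt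
  simp only
  rw [foldA_items, foldB_items]
  rfl
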